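-- pv_equiv track=rewrite | github.com/Bens-Organization/mercedes-nl-search | tests/evaluate_category_classification.py | _is_category_correct
-- ===== SOURCE A (Python) =====
-- from typing import List, Dict, Any
--
-- def _is_category_correct(
--
--     detected: str,
--     expected: str,
--     alternatives: List[str]
-- ) -> bool:
--     """
--     Check if detected category matches expected or alternatives.
--
--     Args:
--         detected: Category detected by system
--         expected: Expected category
--         alternatives: Alternative acceptable categories
--
--     Returns:
--         True if match (exact or partial)
--     """
--     if not expected:
--         # No expected category (ambiguous query)
--         # We consider it "correct" if no category was detected
--         return detected is None
--
--     if not detected: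
--         # Expected a category but none detected
--         return False
--
--     # Exact match
--     if detected == expected:
--         return True
--
--     # Check alternatives
--     if detected in alternatives:
--         return True
--
--     # Partial match (case-insensitive substring)
--     detected_lower = detected.lower()
--     expected_lower = expected.lower()
--
--     if expected_lower in detected_lower or detected_lower in expected_lower:
--         return True
--
--     # Check alternatives partial
--     for alt in alternatives:
--         alt_lower = alt.lower()
--         if alt_lower in detected_lower or detected_lower in alt_lower:
--             return True
--
--     return False
-- ===== SOURCE B (Python) =====
-- def _is_category_correct(detected, expected, alternatives):
--     if not expected:
--         # No expected category (ambiguous query): correct iff nothing detected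
--         return detected is None
--     if not detected:
--         return False
--     d = detected.lower()
--
--     # Recursive scan over one unified candidate list; each candidate is
--     # normalized so that only ONE substring test is needed: the shorter
--     # lowered string is searched inside the longer (mutual containment of
--     # equal-length strings degenerates to equality, so this is exact).
--     def matches(cands):
--         if not cands:
--             return False
--         c = cands[0].lower()
--         s, t = (c, d) if len(c) <= len(d) else (d, c)
--         return s in t or matches(cands[1:])
--
--     return matches([expected] + alternatives)
-- ===== Notes on version B (the rewrite author's own statement) =====
-- stated objective: alternative
-- what changed: Replaces A's four staged checks (exact match, alternatives membership, bidirectional expected partial test, bidirectional loop over alternatives) by one recursive scan over the unified list [expected]+alternatives in which each candidate is length-normalized so a single shorter-in-longer substring test replaces the two directional tests and the exact/membership shortcuts.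
import Mathlib
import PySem

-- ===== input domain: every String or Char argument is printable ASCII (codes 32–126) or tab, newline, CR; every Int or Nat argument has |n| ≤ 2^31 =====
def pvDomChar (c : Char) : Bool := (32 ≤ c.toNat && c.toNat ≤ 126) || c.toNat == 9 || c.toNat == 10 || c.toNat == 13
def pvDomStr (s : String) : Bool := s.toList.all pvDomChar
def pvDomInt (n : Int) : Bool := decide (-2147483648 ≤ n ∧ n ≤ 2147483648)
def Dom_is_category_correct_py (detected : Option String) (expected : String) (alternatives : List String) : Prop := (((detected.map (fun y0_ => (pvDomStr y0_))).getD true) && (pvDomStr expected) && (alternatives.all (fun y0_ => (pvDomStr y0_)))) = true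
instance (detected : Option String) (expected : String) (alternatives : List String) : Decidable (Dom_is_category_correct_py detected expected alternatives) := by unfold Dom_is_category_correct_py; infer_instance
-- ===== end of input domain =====

-- B replaces A's staged checks (exact, membership, two bidirectional partial scans) by one recursive scan over [expected]+alternatives with a length-normalized single substring test per candidate (objective: alternative).


-- ===== PORT A =====
def pyAltsLoop (dl : String) : List String → Bool
  | [] => false
  | alt :: rest =>
    let altLower := PySem.Str.lower alt
    if PySem.Str.isIn altLower dl || PySem.Str.isIn dl altLower then true
    else pyAltsLoop dl rest

def is_category_correct_py (detected : Option String) (expected : String) (alternatives : List String) : Bool :=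
  if expected == "" then detected.isNone
  else
    match detected with
    | none => false
    | some d =>
      if d == "" then false
      else if d == expected then true
      else if alternatives.contains d then true
      else
        let detectedLower := PySem.Str.lower d
        let expectedLower := PySem.Str.lower expected
        if PySem.Str.isIn expectedLower detectedLower || PySem.Str.isIn detectedLower expectedLower then true
        else pyAltsLoop detectedLower alternatives

-- ===== PORT B =====
-- recursive scan: lower the head candidate, order (shorter, longer), one substring test, recurse
def pvMatches (d : String) : List String → Bool
  | [] => false
  | c0 :: rest =>
    let c := PySem.Str.lower c0
    let st := if PySem.Str.len c ≤ PySem.Str.len d then (c, d) else (d, c)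
    PySem.Str.isIn st.1 st.2 || pvMatches d rest

def is_category_correct_py_alt (detected : Option String) (expected : String) (alternatives : List String) : Bool :=
  if expected == "" then detected.isNone
  else
    match detected with
    | none => false
    | some dv =>
      if dv == "" then false
      else pvMatches (PySem.Str.lower dv) (expected :: alternatives)

-- ===== PRECONDITION & SPEC =====
def Spec_is_category_correct_py (detected : Option String) (expected : String) (alternatives : List String) (out : Bool) : Prop := out = is_category_correct_py_alt detected expected alternatives
instance (detected : Option String) (expected : String) (alternatives : List String) (out : Bool) : Decidable (Spec_is_category_correct_py detected expected alternatives out) := by unfold Spec_is_category_correct_py; infer_instance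

-- ===== CLAIM =====
def Claim_equal_is_category_correct_py : Prop := ∀ (detected : Option String) (expected : String) (alternatives : List String), Dom_is_category_correct_py detected expected alternatives → Spec_is_category_correct_py detected expected alternatives (is_category_correct_py detected expected alternatives)

-- ===== LEMMAS AND PROOFS =====

-- the bidirectional test A performs for one candidate c against detected d (both lowered)
def pvTest (d c : String) : Bool :=
  PySem.Str.isIn (PySem.Str.lower c) (PySem.Str.lower d) || PySem.Str.isIn (PySem.Str.lower d) (PySem.Str.lower c)

lemma pvTest_self (d : String) : pvTest d d = true := by
  simp [pvTest, PySem.Chars.isIn_iff_infix]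

-- B's length-normalized single test equals the bidirectional test:
-- with equal lengths mutual containment degenerates to equality
lemma norm_test (a b : String) :
    (if PySem.Str.len a ≤ PySem.Str.len b
       then PySem.Str.isIn a b else PySem.Str.isIn b a)
    = (PySem.Str.isIn a b || PySem.Str.isIn b a) := by
  by_cases h : PySem.Str.len a ≤ PySem.Str.len b
  · rw [if_pos h]
    cases hba : PySem.Str.isIn b a
    · simp
    · have hinf : b.toList <:+: a.toList := (PySem.Str.isIn_iff_infix _ _).mp hba
      have hlen : b.toList.length = a.toList.length := by
        have h1 : b.toList.length ≤ a.toList.length := hinf.sublist.length_le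
        have h2 : a.toList.length ≤ b.toList.length := by
          simpa [PySem.Str.len_eq] using h
        omega
      have heq : b.toList = a.toList := hinf.sublist.eq_of_length hlen
      have hab : PySem.Str.isIn a b = true :=
        (PySem.Str.isIn_iff_infix _ _).mpr (by rw [heq])
      rw [hab]; rfl
  · rw [if_neg h]
    cases hab : PySem.Str.isIn a b
    · rw [Bool.false_or]
    · have hinf : a.toList <:+: b.toList := (PySem.Str.isIn_iff_infix _ _).mp hab
      have hle : a.toList.length ≤ b.toList.length := hinf.sublist.length_le
      exact absurd (by simpa [PySem.Str.len_eq] using hle) h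

lemma pvMatches_eq_any (d : String) (cands : List String) :
    pvMatches (PySem.Str.lower d) cands = cands.any (pvTest d) := by
  induction cands with
  | nil => rfl
  | cons c rest ih =>
    rw [List.any_cons, ← ih]
    show (PySem.Str.isIn
      (if PySem.Str.len (PySem.Str.lower c) ≤ PySem.Str.len (PySem.Str.lower d)
        then ((PySem.Str.lower c), (PySem.Str.lower d)) else ((PySem.Str.lower d), (PySem.Str.lower c))).1
      (if PySem.Str.len (PySem.Str.lower c) ≤ PySem.Str.len (PySem.Str.lower d)
        then ((PySem.Str.lower c), (PySem.Str.lower d)) else ((PySem.Str.lower d), (PySem.Str.lower c))).2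
      || pvMatches (PySem.Str.lower d) rest) = _
    by_cases h : PySem.Str.len (PySem.Str.lower c) ≤ PySem.Str.len (PySem.Str.lower d)
    · rw [if_pos h]
      show (PySem.Str.isIn (PySem.Str.lower c) (PySem.Str.lower d) || _) = _
      rw [show pvTest d c = _ from (norm_test (PySem.Str.lower c) (PySem.Str.lower d)).symm, if_pos h]
    · rw [if_neg h]
      show (PySem.Str.isIn (PySem.Str.lower d) (PySem.Str.lower c) || _) = _
      rw [show pvTest d c = _ from (norm_test (PySem.Str.lower c) (PySem.Str.lower d)).symm, if_neg h]

lemma pyAltsLoop_eq_any (d : String) (alts : List String) :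
    pyAltsLoop (PySem.Str.lower d) alts = alts.any (pvTest d) := by
  induction alts with
  | nil => rfl
  | cons a rest ih =>
    show (if pvTest d a = true then true else pyAltsLoop (PySem.Str.lower d) rest)
        = (pvTest d a || rest.any (pvTest d))
    rw [ih]
    cases hpv : pvTest d a <;> simp

lemma core_eq (d e : String) (alts : List String) :
    (if d == e then true
     else if alts.contains d then true
     else if (PySem.Str.isIn (PySem.Str.lower e) (PySem.Str.lower d)
              || PySem.Str.isIn (PySem.Str.lower d) (PySem.Str.lower e)) = true then true
     else pyAltsLoop (PySem.Str.lower d) alts)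
    = pvMatches (PySem.Str.lower d) (e :: alts) := by
  rw [pvMatches_eq_any, List.any_cons, pyAltsLoop_eq_any]
  by_cases hde : d = e
  · subst hde; simp [pvTest_self]
  · rw [if_neg (by simp [hde])]
    by_cases hc : d ∈ alts
    · rw [if_pos (by simpa using hc)]
      have hany : alts.any (pvTest d) = true :=
        List.any_eq_true.mpr ⟨d, hc, pvTest_self d⟩
      simp [hany]
    · rw [if_neg (by simpa using hc)]
      show _ = (pvTest d e || _)
      cases hpv : pvTest d e
      · rw [if_neg (by simp [pvTest] at hpv; simp [hpv])]
        simp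
      · rw [if_pos (by simpa [pvTest] using hpv)]
        simp

-- ===== VERDICT =====
theorem is_category_correct_py_spec : Claim_equal_is_category_correct_py := by
  intro detected expected alternatives _
  unfold Spec_is_category_correct_py is_category_correct_py is_category_correct_py_alt
  by_cases he : (expected == "") = true
  · rw [if_pos he, if_pos he]
  · rw [if_neg he, if_neg he]
    cases detected with
    | none => rfl
    | some d =>
      dsimp only
      by_cases hd : (d == "") = true
      · rw [if_pos hd, if_pos hd]
      · rw [if_neg hd, if_neg hd]
        exact core_eq d expected alternatives
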